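-- pv_equiv track=rewrite | github.com/AdrienBenamira/my_SAT_solver | generate_dimacs_gift.py | inverseDiffusion
-- ===== SOURCE A (Python) =====
-- def inverseDiffusion(p):
--     b = [0, 0, 0, 0]
--     b[0] = ((p[0] >> 0) & 0x8) ^ ((p[1] >> 1) & 0x4) ^ ((p[2] >> 2) & 0x2) ^ ((p[3] >> 3) & 0x1)
--     b[1] = ((p[0] << 1) & 0x8) ^ ((p[1] >> 0) & 0x4) ^ ((p[2] >> 1) & 0x2) ^ ((p[3] >> 2) & 0x1)
--     b[2] = ((p[0] << 2) & 0x8) ^ ((p[1] << 1) & 0x4) ^ ((p[2] >> 0) & 0x2) ^ ((p[3] >> 1) & 0x1)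
--     b[3] = ((p[0] << 3) & 0x8) ^ ((p[1] << 2) & 0x4) ^ ((p[2] << 1) & 0x2) ^ ((p[3] >> 0) & 0x1)
--     for i in range(len(p)):
--         p[i] = b[i]
--     return p
-- ===== SOURCE B (Python) =====
-- def inverseDiffusion(p):
--     # Transpose view: bit (3-j) of output nibble b[i] is bit (3-i) of input nibble p[j].
--     M = [[(p[j] >> (3 - r)) & 1 for r in range(4)] for j in range(4)]
--     b = [sum(M[j][i] << (3 - j) for j in range(4)) for i in range(4)]
--     for i in range(len(p)):
--         p[i] = b[i]
--     return p
-- ===== Notes on version B (the rewrite author's own statement) =====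
-- stated objective: alternative
-- what changed: B recomputes the inverse bit-diffusion as an explicit 4x4 bit-matrix transpose (extract the bit matrix, read it transposed, reassemble each nibble by summing shifted bits) instead of A's four hand-unrolled shift/mask/xor rows.
import Mathlib
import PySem

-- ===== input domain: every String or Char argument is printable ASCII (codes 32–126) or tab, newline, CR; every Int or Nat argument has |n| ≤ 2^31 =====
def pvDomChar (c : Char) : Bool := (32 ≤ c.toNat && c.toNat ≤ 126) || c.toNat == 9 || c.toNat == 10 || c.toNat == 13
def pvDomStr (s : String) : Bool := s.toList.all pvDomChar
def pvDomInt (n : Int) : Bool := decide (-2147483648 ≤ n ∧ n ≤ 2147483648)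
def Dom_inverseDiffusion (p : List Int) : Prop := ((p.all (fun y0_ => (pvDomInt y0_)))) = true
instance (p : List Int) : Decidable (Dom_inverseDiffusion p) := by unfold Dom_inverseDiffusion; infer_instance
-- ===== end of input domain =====

-- B recomputes the bit-diffusion inverse as an explicit 4×4 bit-matrix transpose (build the bit
-- matrix, read it transposed, reassemble by summation) instead of A's hand-unrolled shift/mask/xor
-- rows; objective: alternative decomposition, same cost. Both Pythons mutate p in place identically;
-- the equivalence proved here is about the return value.

-- ===== PORT A =====
-- p[j] with a constant nonnegative index; Pre_ keeps all indices in range, so the `.getD 0`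
-- default is never reached on admitted inputs.
def pvAGet (p : List Int) (i : Int) : Int := (PySem.List.pyGet? p i).getD 0

def inverseDiffusion (p : List Int) : List Int :=
  let b0 := PySem.Int.bxor (PySem.Int.bxor (PySem.Int.bxor
      (PySem.Int.band (pvAGet p 0 >>> (0:Nat)) 0x8) (PySem.Int.band (pvAGet p 1 >>> (1:Nat)) 0x4))
      (PySem.Int.band (pvAGet p 2 >>> (2:Nat)) 0x2)) (PySem.Int.band (pvAGet p 3 >>> (3:Nat)) 0x1)
  let b1 := PySem.Int.bxor (PySem.Int.bxor (PySem.Int.bxor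
      (PySem.Int.band (pvAGet p 0 <<< (1:Nat)) 0x8) (PySem.Int.band (pvAGet p 1 >>> (0:Nat)) 0x4))
      (PySem.Int.band (pvAGet p 2 >>> (1:Nat)) 0x2)) (PySem.Int.band (pvAGet p 3 >>> (2:Nat)) 0x1)
  let b2 := PySem.Int.bxor (PySem.Int.bxor (PySem.Int.bxor
      (PySem.Int.band (pvAGet p 0 <<< (2:Nat)) 0x8) (PySem.Int.band (pvAGet p 1 <<< (1:Nat)) 0x4))
      (PySem.Int.band (pvAGet p 2 >>> (0:Nat)) 0x2)) (PySem.Int.band (pvAGet p 3 >>> (1:Nat)) 0x1)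
  let b3 := PySem.Int.bxor (PySem.Int.bxor (PySem.Int.bxor
      (PySem.Int.band (pvAGet p 0 <<< (3:Nat)) 0x8) (PySem.Int.band (pvAGet p 1 <<< (2:Nat)) 0x4))
      (PySem.Int.band (pvAGet p 2 <<< (1:Nat)) 0x2)) (PySem.Int.band (pvAGet p 3 >>> (0:Nat)) 0x1)
  let b := [b0, b1, b2, b3]
  -- for i in range(len(p)): p[i] = b[i]  (indices are 0..len(p)-1, all nonnegative)
  (List.range p.length).foldl (fun acc i => acc.set i (b[i]?.getD 0)) p

-- ===== PORT B =====
-- M[j][r] = (p[j] >> (3-r)) & 1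
def pvBGet (p : List Int) (j : Nat) : Int := (PySem.List.pyGet? p (Int.ofNat j)).getD 0

def pvMGet (M : List (List Int)) (j i : Nat) : Int := ((M[j]?.getD [])[i]?).getD 0

def inverseDiffusion_alt (p : List Int) : List Int :=
  let M : List (List Int) :=
    (List.range 4).map (fun (j : Nat) => (List.range 4).map (fun (r : Nat) => PySem.Int.band (pvBGet p j >>> ((3:Nat) - r)) 1))
  let b : List Int :=
    (List.range 4).map (fun (i : Nat) => ((List.range 4).map (fun (j : Nat) => pvMGet M j i <<< ((3:Nat) - j))).sum)
  (List.range p.length).foldl (fun acc i => acc.set i (b[i]?.getD 0)) p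

-- ===== PRECONDITION & SPEC =====
-- A reads p[0..3] and then writes b[i] for every i < len(p); it raises IndexError unless len(p) = 4.
def Pre_inverseDiffusion (p : List Int) : Prop := p.length = 4
instance (p : List Int) : Decidable (Pre_inverseDiffusion p) := by unfold Pre_inverseDiffusion; infer_instance
def pvWitness_inverseDiffusion : List Int := [1, 2, 3, 4]

def Spec_inverseDiffusion (p : List Int) (out : List Int) : Prop := out = inverseDiffusion_alt p
instance (p : List Int) (out : List Int) : Decidable (Spec_inverseDiffusion p out) := by unfold Spec_inverseDiffusion; infer_instance

-- ===== CLAIM (what is proved, stated in full; the proofs are below) =====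
def Claim_equal_inverseDiffusion : Prop := ∀ (p : List Int), Dom_inverseDiffusion p → Pre_inverseDiffusion p → Spec_inverseDiffusion p (inverseDiffusion p)

-- ===== LEMMAS AND PROOFS =====

-- band with a power of two extracts one bit of the two's-complement representation.
theorem band_two_pow (x : Int) (m : Nat) :
    PySem.Int.band x (2 ^ m) = x / 2 ^ m % 2 * 2 ^ m := by
  have h2 : ((2:Int) ^ m) = ((2 ^ m : Nat) : Int) := by push_cast; ring
  by_cases hx : 0 ≤ x
  · obtain ⟨n, rfl⟩ := Int.eq_ofNat_of_zero_le hx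
    rw [h2, PySem.Int.band_natCast, Nat.and_two_pow, Nat.testBit_eq_decide_div_mod_eq]
    have hq : ((n:Int)) / ((2^m : Nat) : Int) % 2 = ((n / 2^m % 2 : Nat) : Int) := by push_cast; rfl
    rw [hq]
    rcases Nat.mod_two_eq_zero_or_one (n / 2^m) with h | h <;> simp [h]
  · push_neg at hx
    have hb : (0:Int) ≤ 2 ^ m := by positivity
    unfold PySem.Int.band
    rw [if_neg (by omega), if_pos hb]
    set n : Nat := (-x - 1).toNat with hn
    have hxn : x = -(n:Int) - 1 := by simp [hn]; omega
    have htn : ((2:Int)^m).toNat = 2 ^ m := by rw [h2, Int.toNat_natCast]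
    rw [htn, Nat.two_pow_and, Nat.testBit_eq_decide_div_mod_eq]
    have hdiv : x / 2 ^ m = -((n / 2 ^ m : Nat) : Int) - 1 := by
      have hpos : (0:Int) < 2 ^ m := by positivity
      have hm : ((n % 2^m : Nat) : Int) < 2 ^ m := by
        rw [h2]; exact_mod_cast Nat.mod_lt _ (by positivity)
      have hdm : (2:Int) ^ m * ((n / 2^m : Nat) : Int) + ((n % 2^m : Nat) : Int) = (n : Int) := by
        rw [h2]; exact_mod_cast Nat.div_add_mod n (2^m)
      exact ((Int.ediv_emod_unique (a := x) (b := 2 ^ m)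
        (q := -((n / 2 ^ m : Nat) : Int) - 1) (r := 2 ^ m - 1 - ((n % 2^m : Nat) : Int)) hpos).mpr
        ⟨by rw [hxn]; ring_nf; ring_nf at hdm; omega, by omega, by omega⟩).1
    rw [hdiv]
    have hq : (-((n / 2 ^ m : Nat) : Int) - 1) % 2 = 1 - (((n / 2 ^ m) % 2 : Nat) : Int) := by omega
    rw [hq]
    rcases Nat.mod_two_eq_zero_or_one (n / 2^m) with h | h <;> simp [h]

theorem band_shr (x : Int) (s m : Nat) :
    PySem.Int.band (x >>> s) (2 ^ m) = x / 2 ^ (s + m) % 2 * 2 ^ m := by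
  rw [band_two_pow, Int.shiftRight_eq_div_pow]
  congr 2
  rw [show ((2^s : Nat) : Int) = (2:Int)^s by push_cast; ring,
      Int.ediv_ediv_of_nonneg (by positivity), ← pow_add]

theorem band_shl (x : Int) (s m : Nat) (h : s ≤ m) :
    PySem.Int.band (x <<< s) (2 ^ m) = x / 2 ^ (m - s) % 2 * 2 ^ m := by
  rw [band_two_pow, Int.shiftLeft_eq]
  congr 2
  have : (2:Int) ^ m = 2 ^ (m - s) * 2 ^ s := by rw [← pow_add]; congr 1; omega
  rw [this, Int.mul_ediv_mul_of_pos_left _ _ (by positivity)]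

theorem inverseDiffusion_spec : Claim_equal_inverseDiffusion := by
  intro p _ hpre
  unfold Pre_inverseDiffusion at hpre
  obtain ⟨x0, x1, x2, x3, rfl⟩ : ∃ a b c d : Int, p = [a,b,c,d] := by
    match p, hpre with
    | [a,b,c,d], _ => exact ⟨a,b,c,d, rfl⟩
  unfold Spec_inverseDiffusion inverseDiffusion inverseDiffusion_alt
  simp [pvAGet, pvBGet, pvMGet, PySem.List.pyGet?, PySem.List.pyIdx?, List.range_succ]
  refine ⟨?_, ?_, ?_, ?_⟩
  · have a0 : PySem.Int.band x0 8 = x0 / 8 % 2 * 8 := by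
      have := band_shr x0 0 3; norm_num at this; simpa using this
    have a1 : PySem.Int.band (x1 >>> (1:Nat)) 4 = x1 / 8 % 2 * 4 := by
      have := band_shr x1 1 2; norm_num at this; simpa using this
    have a2 : PySem.Int.band (x2 >>> (2:Nat)) 2 = x2 / 8 % 2 * 2 := by
      have := band_shr x2 2 1; norm_num at this; simpa using this
    have a3 : PySem.Int.band (x3 >>> (3:Nat)) 1 = x3 / 8 % 2 * 1 := by
      have := band_shr x3 3 0; norm_num at this; simpa using this
    have b0 : PySem.Int.band (x0 >>> (3:Nat)) 1 = x0 / 8 % 2 := by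
      have := band_shr x0 3 0; norm_num at this; simpa using this
    have b1 : PySem.Int.band (x1 >>> (3:Nat)) 1 = x1 / 8 % 2 := by
      have := band_shr x1 3 0; norm_num at this; simpa using this
    have b2 : PySem.Int.band (x2 >>> (3:Nat)) 1 = x2 / 8 % 2 := by
      have := band_shr x2 3 0; norm_num at this; simpa using this
    have b3 : PySem.Int.band (x3 >>> (3:Nat)) 1 = x3 / 8 % 2 := by
      have := band_shr x3 3 0; norm_num at this; simpa using this
    simp only [a0, a1, a2, a3, b0, b1, b2, b3]
    simp only [Int.shiftLeft_eq]
    rcases Int.emod_two_eq (x0 / 8) with h0 | h0 <;>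
      rcases Int.emod_two_eq (x1 / 8) with h1 | h1 <;>
        rcases Int.emod_two_eq (x2 / 8) with h2 | h2 <;>
          rcases Int.emod_two_eq (x3 / 8) with h3 | h3 <;>
            (rw [h0, h1, h2, h3]; try decide)
  · have a0 : PySem.Int.band (x0 <<< (1:Nat)) 8 = x0 / 4 % 2 * 8 := by
      have := band_shl x0 1 3 (by omega); norm_num at this; simpa using this
    have a1 : PySem.Int.band x1 4 = x1 / 4 % 2 * 4 := by
      have := band_shr x1 0 2; norm_num at this; simpa using this
    have a2 : PySem.Int.band (x2 >>> (1:Nat)) 2 = x2 / 4 % 2 * 2 := by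
      have := band_shr x2 1 1; norm_num at this; simpa using this
    have a3 : PySem.Int.band (x3 >>> (2:Nat)) 1 = x3 / 4 % 2 * 1 := by
      have := band_shr x3 2 0; norm_num at this; simpa using this
    have b0 : PySem.Int.band (x0 >>> (2:Nat)) 1 = x0 / 4 % 2 := by
      have := band_shr x0 2 0; norm_num at this; simpa using this
    have b1 : PySem.Int.band (x1 >>> (2:Nat)) 1 = x1 / 4 % 2 := by
      have := band_shr x1 2 0; norm_num at this; simpa using this
    have b2 : PySem.Int.band (x2 >>> (2:Nat)) 1 = x2 / 4 % 2 := by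
      have := band_shr x2 2 0; norm_num at this; simpa using this
    have b3 : PySem.Int.band (x3 >>> (2:Nat)) 1 = x3 / 4 % 2 := by
      have := band_shr x3 2 0; norm_num at this; simpa using this
    simp only [a0, a1, a2, a3, b0, b1, b2, b3]
    simp only [Int.shiftLeft_eq]
    rcases Int.emod_two_eq (x0 / 4) with h0 | h0 <;>
      rcases Int.emod_two_eq (x1 / 4) with h1 | h1 <;>
        rcases Int.emod_two_eq (x2 / 4) with h2 | h2 <;>
          rcases Int.emod_two_eq (x3 / 4) with h3 | h3 <;>
            (rw [h0, h1, h2, h3]; try decide)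
  · have a0 : PySem.Int.band (x0 <<< (2:Nat)) 8 = x0 / 2 % 2 * 8 := by
      have := band_shl x0 2 3 (by omega); norm_num at this; simpa using this
    have a1 : PySem.Int.band (x1 <<< (1:Nat)) 4 = x1 / 2 % 2 * 4 := by
      have := band_shl x1 1 2 (by omega); norm_num at this; simpa using this
    have a2 : PySem.Int.band x2 2 = x2 / 2 % 2 * 2 := by
      have := band_shr x2 0 1; norm_num at this; simpa using this
    have a3 : PySem.Int.band (x3 >>> (1:Nat)) 1 = x3 / 2 % 2 * 1 := by
      have := band_shr x3 1 0; norm_num at this; simpa using this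
    have b0 : PySem.Int.band (x0 >>> (1:Nat)) 1 = x0 / 2 % 2 := by
      have := band_shr x0 1 0; norm_num at this; simpa using this
    have b1 : PySem.Int.band (x1 >>> (1:Nat)) 1 = x1 / 2 % 2 := by
      have := band_shr x1 1 0; norm_num at this; simpa using this
    have b2 : PySem.Int.band (x2 >>> (1:Nat)) 1 = x2 / 2 % 2 := by
      have := band_shr x2 1 0; norm_num at this; simpa using this
    have b3 : PySem.Int.band (x3 >>> (1:Nat)) 1 = x3 / 2 % 2 := by
      have := band_shr x3 1 0; norm_num at this; simpa using this
    simp only [a0, a1, a2, a3, b0, b1, b2, b3]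
    simp only [Int.shiftLeft_eq]
    rcases Int.emod_two_eq (x0 / 2) with h0 | h0 <;>
      rcases Int.emod_two_eq (x1 / 2) with h1 | h1 <;>
        rcases Int.emod_two_eq (x2 / 2) with h2 | h2 <;>
          rcases Int.emod_two_eq (x3 / 2) with h3 | h3 <;>
            (rw [h0, h1, h2, h3]; try decide)
  · have a0 : PySem.Int.band (x0 <<< (3:Nat)) 8 = x0 / 1 % 2 * 8 := by
      have := band_shl x0 3 3 (by omega); norm_num at this; simpa using this
    have a1 : PySem.Int.band (x1 <<< (2:Nat)) 4 = x1 / 1 % 2 * 4 := by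
      have := band_shl x1 2 2 (by omega); norm_num at this; simpa using this
    have a2 : PySem.Int.band (x2 <<< (1:Nat)) 2 = x2 / 1 % 2 * 2 := by
      have := band_shl x2 1 1 (by omega); norm_num at this; simpa using this
    have a3 : PySem.Int.band x3 1 = x3 / 1 % 2 * 1 := by
      have := band_shr x3 0 0; norm_num at this; simpa using this
    have b0 : PySem.Int.band x0 1 = x0 / 1 % 2 := by
      have := band_shr x0 0 0; norm_num at this; simpa using this
    have b1 : PySem.Int.band x1 1 = x1 / 1 % 2 := by
      have := band_shr x1 0 0; norm_num at this; simpa using this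
    have b2 : PySem.Int.band x2 1 = x2 / 1 % 2 := by
      have := band_shr x2 0 0; norm_num at this; simpa using this
    have b3 : PySem.Int.band x3 1 = x3 / 1 % 2 := by
      have := band_shr x3 0 0; norm_num at this; simpa using this
    simp only [a0, a1, a2, a3, b0, b1, b2, b3]
    simp only [Int.shiftLeft_eq]
    rcases Int.emod_two_eq (x0 / 1) with h0 | h0 <;>
      rcases Int.emod_two_eq (x1 / 1) with h1 | h1 <;>
        rcases Int.emod_two_eq (x2 / 1) with h2 | h2 <;>
          rcases Int.emod_two_eq (x3 / 1) with h3 | h3 <;>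
            (rw [h0, h1, h2, h3]; try decide)
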